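-- pv_equiv track=rewrite | github.com/MestreAlex/horario | core/feature_processor.py | _extract_daily_features
-- ===== SOURCE A (Python) =====
-- from typing import Dict, List, Any
--
-- def _extract_daily_features(aulas_dia: Dict[int, Dict]) -> List[float]:
--     """Extrai características de um dia específico"""
--     features = []
--
--     # Total de aulas no dia
--     total_aulas = len([a for a in aulas_dia.values() if a])
--
--     # Distribuição ao longo do dia
--     horarios = sorted([int(h) for h in aulas_dia.keys()])
--     if horarios:
--         primeiro_horario = min(horarios)
--         ultimo_horario = max(horarios)
--         janelas = sum(1 for h in range(primeiro_horario, ultimo_horario)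
--                      if h not in aulas_dia or not aulas_dia[h])
--     else:
--         janelas = 0
--
--     features.extend([
--         total_aulas,
--         janelas,
--         primeiro_horario if horarios else 0,
--         ultimo_horario if horarios else 0
--     ])
--
--     return features
-- ===== SOURCE B (Python) =====
-- def _extract_daily_features(aulas_dia):
--     """Closed-form janelas instead of scanning range(primeiro, ultimo)."""
--     if not aulas_dia:
--         return [0, 0, 0, 0]
--     total_aulas = sum(1 for v in aulas_dia.values() if v)
--     primeiro = min(aulas_dia)
--     ultimo = max(aulas_dia)
--     janelas = (ultimo - primeiro) - total_aulas + (1 if aulas_dia[ultimo] else 0)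
--     return [total_aulas, janelas, primeiro, ultimo]
-- ===== Notes on version B (the rewrite author's own statement) =====
-- stated objective: faster
-- what changed: B replaces A's sort of the keys and its scan over every hour in range(primeiro, ultimo) with direct min/max over the keys and the closed form janelas = (ultimo - primeiro) - total_aulas + (1 if aulas_dia[ultimo] else 0).
import Mathlib
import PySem

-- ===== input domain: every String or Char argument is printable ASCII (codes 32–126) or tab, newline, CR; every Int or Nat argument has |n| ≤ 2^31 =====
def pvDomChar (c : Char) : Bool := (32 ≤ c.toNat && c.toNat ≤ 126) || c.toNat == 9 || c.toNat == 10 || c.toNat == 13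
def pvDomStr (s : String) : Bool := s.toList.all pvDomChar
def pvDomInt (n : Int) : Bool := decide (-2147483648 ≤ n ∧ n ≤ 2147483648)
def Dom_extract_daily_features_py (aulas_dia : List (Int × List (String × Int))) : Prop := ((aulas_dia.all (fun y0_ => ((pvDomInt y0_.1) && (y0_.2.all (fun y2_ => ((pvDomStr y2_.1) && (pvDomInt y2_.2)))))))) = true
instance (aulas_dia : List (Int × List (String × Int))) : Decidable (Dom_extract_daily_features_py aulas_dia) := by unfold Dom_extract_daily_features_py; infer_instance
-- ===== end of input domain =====

-- B replaces A's scan of range(primeiro, ultimo) by the closed form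
-- (ultimo - primeiro) - total_aulas + (1 if aulas_dia[ultimo] else 0); same return value.

-- ===== PORT A =====
def extract_daily_features_py (aulas_dia : List (Int × List (String × Int))) : List Int :=
  let d := PySem.Dict.ofList aulas_dia
  -- total_aulas = len([a for a in aulas_dia.values() if a])
  let total_aulas : Int := ((d.values.filter (fun a => decide (a ≠ []))).length : Int)
  -- horarios = sorted([int(h) for h in aulas_dia.keys()])  (int(h) on an int key is h)
  let horarios := PySem.List.sorted (d.keys.map (fun h => h)) (fun x => x) false
  match horarios with
  | [] => [total_aulas, 0, 0, 0]
  | _ :: _ =>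
    let primeiro_horario := (PySem.List.min? horarios (fun x => x)).getD 0
    let ultimo_horario := (PySem.List.max? horarios (fun x => x)).getD 0
    -- janelas = sum(1 for h in range(primeiro, ultimo) if h not in aulas_dia or not aulas_dia[h])
    let janelas : Int := ((PySem.List.pyRange primeiro_horario ultimo_horario 1).map
        (fun h => if d.contains h = false ∨ d.getD h [] = [] then (1 : Int) else 0)).sum
    [total_aulas, janelas, primeiro_horario, ultimo_horario]

-- ===== PORT B =====
def extract_daily_features_py_alt (aulas_dia : List (Int × List (String × Int))) : List Int :=
  let d := PySem.Dict.ofList aulas_dia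
  if d.items = [] then [0, 0, 0, 0]
  else
    let total_aulas : Int := (d.values.map (fun v => if v ≠ [] then (1 : Int) else 0)).sum
    let primeiro := (PySem.List.min? d.keys (fun x => x)).getD 0
    let ultimo := (PySem.List.max? d.keys (fun x => x)).getD 0
    let janelas : Int := (ultimo - primeiro) - total_aulas +
      (if d.getD ultimo [] ≠ [] then 1 else 0)
    [total_aulas, janelas, primeiro, ultimo]

-- ===== PRECONDITION & SPEC =====
def Spec_extract_daily_features_py (aulas_dia : List (Int × List (String × Int))) (out : List Int) : Prop := out = extract_daily_features_py_alt aulas_dia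
instance (aulas_dia : List (Int × List (String × Int))) (out : List Int) : Decidable (Spec_extract_daily_features_py aulas_dia out) := by unfold Spec_extract_daily_features_py; infer_instance

-- ===== CLAIM (what is proved, stated in full; the proofs are below) =====
def Claim_equal_extract_daily_features_py : Prop := ∀ (aulas_dia : List (Int × List (String × Int))), Dom_extract_daily_features_py aulas_dia → Spec_extract_daily_features_py aulas_dia (extract_daily_features_py aulas_dia)

-- ===== LEMMAS AND PROOFS =====

-- min/max over id depend only on the multiset of elements
theorem min_id_eq_of_perm (xs ys : List Int) (h : xs.Perm ys) :
    PySem.List.min? xs (fun x => x) = PySem.List.min? ys (fun x => x) := by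
  match hx : PySem.List.min? xs (fun x => x), hy : PySem.List.min? ys (fun x => x) with
  | none, none => rfl
  | none, some m =>
    rw [(PySem.List.min?_eq_none_iff xs _).mp hx] at h
    have hm := PySem.List.min?_mem hy
    rw [← h.mem_iff] at hm; simp at hm
  | some m, none =>
    rw [(PySem.List.min?_eq_none_iff ys _).mp hy] at h
    have hm := PySem.List.min?_mem hx
    rw [h.mem_iff] at hm; simp at hm
  | some m1, some m2 =>
    have h1 := PySem.List.min?_isMin hx m2 (h.mem_iff.mpr (PySem.List.min?_mem hy))
    have h2 := PySem.List.min?_isMin hy m1 (h.mem_iff.mp (PySem.List.min?_mem hx))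
    simp at h1 h2 ⊢
    omega

theorem max_id_eq_of_perm (xs ys : List Int) (h : xs.Perm ys) :
    PySem.List.max? xs (fun x => x) = PySem.List.max? ys (fun x => x) := by
  match hx : PySem.List.max? xs (fun x => x), hy : PySem.List.max? ys (fun x => x) with
  | none, none => rfl
  | none, some m =>
    rw [(PySem.List.max?_eq_none_iff xs _).mp hx] at h
    have hm := PySem.List.max?_mem hy
    rw [← h.mem_iff] at hm; simp at hm
  | some m, none =>
    rw [(PySem.List.max?_eq_none_iff ys _).mp hy] at h
    have hm := PySem.List.max?_mem hx
    rw [h.mem_iff] at hm; simp at hm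
  | some m1, some m2 =>
    have h1 := PySem.List.max?_isMax hx m2 (h.mem_iff.mpr (PySem.List.max?_mem hy))
    have h2 := PySem.List.max?_isMax hy m1 (h.mem_iff.mp (PySem.List.max?_mem hx))
    simp at h1 h2 ⊢
    omega

theorem countP_split_at (K : List Int) (u : Int) (hu : u ∈ K) (hnd : K.Nodup)
    (p : Int → Bool) :
    K.countP p = K.countP (fun k => decide (k ≠ u) && p k) + (if p u then 1 else 0) := by
  induction K with
  | nil => simp at hu
  | cons a t ih =>
    rcases List.mem_cons.mp hu with rfl | hut
    · have hnu : u ∉ t := (List.nodup_cons.mp hnd).1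
      simp [List.countP_cons]
      exact (List.countP_congr fun x hx => by simp [show x ≠ u from fun e => hnu (e ▸ hx)]).symm
    · have hau : a ≠ u := fun e => (List.nodup_cons.mp hnd).1 (e ▸ hut)
      have := ih hut (List.nodup_cons.mp hnd).2
      simp [List.countP_cons, this, hau]; split_ifs <;> omega

theorem body_eq (d : PySem.Dict Int (List (String × Int))) (hnd : d.keys.Nodup) :
    (let total_aulas : Int := ((d.values.filter (fun a => decide (a ≠ []))).length : Int)
     let horarios := PySem.List.sorted (d.keys.map (fun h => h)) (fun x => x) false
     match horarios with
     | [] => [total_aulas, 0, 0, 0]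
     | _ :: _ =>
       let primeiro_horario := (PySem.List.min? horarios (fun x => x)).getD 0
       let ultimo_horario := (PySem.List.max? horarios (fun x => x)).getD 0
       let janelas : Int := ((PySem.List.pyRange primeiro_horario ultimo_horario 1).map
           (fun h => if d.contains h = false ∨ d.getD h [] = [] then (1 : Int) else 0)).sum
       [total_aulas, janelas, primeiro_horario, ultimo_horario]) =
    (if d.items = [] then [0, 0, 0, 0]
     else
       let total_aulas : Int := (d.values.map (fun v => if v ≠ [] then (1 : Int) else 0)).sum
       let primeiro := (PySem.List.min? d.keys (fun x => x)).getD 0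
       let ultimo := (PySem.List.max? d.keys (fun x => x)).getD 0
       let janelas : Int := (ultimo - primeiro) - total_aulas +
         (if d.getD ultimo [] ≠ [] then 1 else 0)
       [total_aulas, janelas, primeiro, ultimo]) := by
  by_cases hK : d.keys = []
  · have hitems : d.items = [] := by
      simpa [PySem.Dict.keys, List.map_eq_nil_iff] using hK
    have hs : PySem.List.sorted ([] : List Int) (fun h => h) false = [] := by
      simp [PySem.List.sorted_eq_nil_iff]
    simp [hK, hitems, PySem.Dict.values, hs]
  · have hitems : d.items ≠ [] := fun e => hK (by simp [PySem.Dict.keys, e])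
    have hperm : (PySem.List.sorted (d.keys.map (fun h => h)) (fun x => x) false).Perm d.keys := by
      simpa using PySem.List.sorted_perm (d.keys.map (fun h => h)) (fun x => x) false
    have hhne : PySem.List.sorted (d.keys.map (fun h => h)) (fun x => x) false ≠ [] := by
      intro e; rw [e] at hperm; exact hK hperm.symm.eq_nil
    obtain ⟨pm, hp⟩ : ∃ pm, PySem.List.min? d.keys (fun x => x) = some pm := by
      cases hmp : PySem.List.min? d.keys (fun x => x) with
      | none => exact absurd ((PySem.List.min?_eq_none_iff _ _).mp hmp) hK
      | some pm => exact ⟨pm, rfl⟩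
    obtain ⟨um, hu⟩ : ∃ um, PySem.List.max? d.keys (fun x => x) = some um := by
      cases hmp : PySem.List.max? d.keys (fun x => x) with
      | none => exact absurd ((PySem.List.max?_eq_none_iff _ _).mp hmp) hK
      | some um => exact ⟨um, rfl⟩
    have hmins : PySem.List.min? (PySem.List.sorted (d.keys.map (fun h => h)) (fun x => x) false) (fun x => x) = some pm := by
      rw [min_id_eq_of_perm _ _ hperm]; exact hp
    have hmaxs : PySem.List.max? (PySem.List.sorted (d.keys.map (fun h => h)) (fun x => x) false) (fun x => x) = some um := by
      rw [max_id_eq_of_perm _ _ hperm]; exact hu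
    obtain ⟨a, t, hh⟩ := List.exists_cons_of_ne_nil hhne
    rw [hh] at hmins hmaxs ⊢
    simp only [hmins, hmaxs, Option.getD_some, if_neg hitems]
    -- component equalities
    have hvals : d.values = d.keys.map (fun k => d.getD k []) :=
      PySem.Dict.values_eq_map_keys d hnd []
    have htot : ((d.values.filter (fun a => decide (a ≠ []))).length : Int) =
        (d.keys.countP (fun k => decide (d.getD k [] ≠ [])) : Int) := by
      rw [← List.countP_eq_length_filter, hvals, List.countP_map]
      rfl
    have htotB : (d.values.map (fun v => if v ≠ [] then (1 : Int) else 0)).sum =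
        (d.keys.countP (fun k => decide (d.getD k [] ≠ [])) : Int) := by
      have he : (fun v : List (String × Int) => if v ≠ [] then (1 : Int) else 0) =
          (fun v => if (fun a : List (String × Int) => decide (a ≠ [])) v = true then (1 : Int) else 0) := by
        funext v; simp
      rw [he, PySem.List.sum_map_ite_one_zero (fun a => decide (a ≠ [])) d.values, hvals,
        List.countP_map]
      rfl
    have hja : ((PySem.List.pyRange pm um 1).map
        (fun h => if d.contains h = false ∨ d.getD h [] = [] then (1 : Int) else 0)).sum =
        ((PySem.List.pyRange pm um 1).countP
          (fun h => !(d.contains h) || decide (d.getD h [] = [])) : Int) := by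
      have he : (fun h : Int => if d.contains h = false ∨ d.getD h [] = [] then (1 : Int) else 0) =
          (fun h => if (fun h : Int => !(d.contains h) || decide (d.getD h [] = [])) h = true then (1 : Int) else 0) := by
        funext h; by_cases hc : d.contains h = false ∨ d.getD h [] = [] <;> simp_all
      rw [he, PySem.List.sum_map_ite_one_zero]
    have hple : ∀ k ∈ d.keys, pm ≤ k := fun k hk => by
      simpa using PySem.List.min?_isMin hp k hk
    have hule : ∀ k ∈ d.keys, k ≤ um := fun k hk => by
      simpa using PySem.List.max?_isMax hu k hk
    have humem : um ∈ d.keys := PySem.List.max?_mem hu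
    have hpule : pm ≤ um := hple um humem
    have hsplitlen := List.length_eq_countP_add_countP
      (fun h : Int => !(d.contains h) || decide (d.getD h [] = []))
      (l := PySem.List.pyRange pm um 1)
    have hNC : (PySem.List.pyRange pm um 1).countP
        (fun h => decide ¬((fun h : Int => !(d.contains h) || decide (d.getD h [] = [])) h = true)) =
        d.keys.countP (fun k => decide (k ≠ um) && decide (d.getD k [] ≠ [])) := by
      rw [List.countP_eq_length_filter, List.countP_eq_length_filter]
      apply List.Perm.length_eq
      apply (List.perm_ext_iff_of_nodup ((PySem.List.nodup_pyRange_one pm um).filter _)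
        (hnd.filter _)).mpr
      intro x
      simp only [List.mem_filter, PySem.List.mem_pyRange_one,
        PySem.Dict.contains_eq_decide_mem_keys]
      constructor
      · rintro ⟨⟨h1, h2⟩, h3⟩
        simp at h3
        simp [h3.1, h3.2]
        omega
      · rintro ⟨h1, h2⟩
        simp at h2
        have := hple x h1
        have := hule x h1
        simp [h1, h2.2]
        omega
    have hsplit := countP_split_at d.keys um humem hnd (fun k => decide (d.getD k [] ≠ []))
    rw [htot, htotB, hja, hsplit, hp, hu]
    simp only [Option.getD_some, List.cons.injEq, and_true, true_and]
    have hlenR := PySem.List.length_pyRange_one pm um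
    rw [hNC, hlenR] at hsplitlen
    by_cases hTu : d.getD um [] = [] <;> simp [hTu] at hsplitlen ⊢ <;> omega

-- ===== VERDICT (by name: the statement is the Claim_ definition above) =====
theorem extract_daily_features_py_spec : Claim_equal_extract_daily_features_py := by
  intro aulas_dia _
  unfold Spec_extract_daily_features_py extract_daily_features_py extract_daily_features_py_alt
  exact body_eq (PySem.Dict.ofList aulas_dia) (PySem.Dict.nodup_keys_ofList aulas_dia)
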